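-- pv_equiv track=rewrite | github.com/PEC-CSS/Graveyard2025 | cp/Solved Network XOR #23.py | get_unique_xor_values
-- ===== SOURCE A (Python) =====
-- from itertools import combinations
-- from functools import lru_cache
--
-- def get_unique_xor_values(n, data_packets):
--     xor_values = set()
--
--     @lru_cache(None)
--     def dfs(state):
--         state = tuple(sorted(state))
--
--         if state in visited:
--             return
--         visited.add(state)
--
--         xor_result = 0
--         for value in state:
--             xor_result ^= value
--         xor_values.add(xor_result)
--
--         for x, y in combinations(range(len(state)), 2):
--             new_state = list(state)
--             new_state[y] += new_state[x]
--             new_state[x] = 0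
--             new_state = tuple(sorted(num for num in new_state if num != 0))
--             dfs(new_state)
--
--     visited = set()
--     dfs(tuple(data_packets))
--
--     return len(xor_values)
-- ===== SOURCE B (Python) =====
-- def get_unique_xor_values(n, data_packets):
--     # Enumerate set partitions directly (first block = the one containing the head),
--     # memoised on the remaining sub-sequence; collect XORs of block sums.
--     memo = {}
--
--     def splits(items):
--         # all ways to split items into two subsequences (kept, rest)
--         if not items:
--             return [([], [])]
--         h, t = items[0], items[1:]
--         res = []
--         for a, b in splits(t):
--             res.append(([h] + a, b))
--             res.append((a, [h] + b))
--         return res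
--
--     def go(items):
--         # set of XOR-of-block-sums over all partitions of items
--         key = tuple(items)
--         if key in memo:
--             return memo[key]
--         if not items:
--             out = {0}
--         else:
--             h, t = items[0], items[1:]
--             out = set()
--             for block, remaining in splits(t):
--                 s = h + sum(block)
--                 for v in go(remaining):
--                     out.add(s ^ v)
--         memo[key] = out
--         return out
--
--     return len(go(list(data_packets)))
-- ===== Notes on version B (the rewrite author's own statement) =====
-- stated objective: faster
-- what changed: Replaces the memoised DFS over merge-states (repeatedly combining two packets and re-sorting/deduplicating state tuples) by a direct recursive enumeration of set partitions - first block is the one containing the head element, recurse on the remainder - memoised on the remaining sub-sequence, collecting XORs of block sums.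
import Mathlib
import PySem

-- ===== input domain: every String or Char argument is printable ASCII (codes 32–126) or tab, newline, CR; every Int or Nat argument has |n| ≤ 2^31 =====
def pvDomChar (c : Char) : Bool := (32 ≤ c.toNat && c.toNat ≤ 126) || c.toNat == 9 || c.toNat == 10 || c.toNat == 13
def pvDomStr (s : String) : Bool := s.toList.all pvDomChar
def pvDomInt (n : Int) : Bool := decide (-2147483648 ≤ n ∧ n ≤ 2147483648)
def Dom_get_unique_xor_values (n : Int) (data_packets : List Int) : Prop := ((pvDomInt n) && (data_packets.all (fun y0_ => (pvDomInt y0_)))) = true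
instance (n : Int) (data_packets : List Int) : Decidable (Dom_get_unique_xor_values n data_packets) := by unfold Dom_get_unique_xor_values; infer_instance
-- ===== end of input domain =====

-- B replaces A's memoised DFS over merge-states by a direct recursive enumeration of set
-- partitions (memoised on the remaining sub-sequence), collecting XORs of block sums.

-- ===== PORT A =====

-- sorted(xs) on ints
def pvSortI (l : List Int) : List Int := PySem.List.sorted l (fun x => x) false

-- xor_result = 0; for value in state: xor_result ^= value
def pvXorL (l : List Int) : Int := l.foldl (fun a v => PySem.Int.bxor a v) 0

-- combinations(range(len(state)), 2): pairs (x, y) with x < y, in order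
def pvPairs (n : Nat) : List (Nat × Nat) :=
  (List.range n).flatMap (fun x => ((List.range n).filter (fun y => decide (x < y))).map (fun y => (x, y)))

-- new_state = list(state); new_state[y] += new_state[x]; new_state[x] = 0;
-- tuple(sorted(num for num in new_state if num != 0))
def pvMerge (state : List Int) (x y : Nat) : List Int :=
  let ns := state.set y (state.getD y 0 + state.getD x 0)
  let ns := ns.set x 0
  pvSortI (ns.filter (fun num => decide (num ≠ 0)))

-- dfs with a fuel counter (each recursive call's state is strictly shorter, so
-- fuel = initial length + 1 is enough; proved below); threads (visited, xor_values)
def pvDfs : Nat → List Int → PySem.Set (List Int) × PySem.Set Int →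
    PySem.Set (List Int) × PySem.Set Int
  | 0, _, acc => acc
  | fuel + 1, state0, acc =>
    let state := pvSortI state0
    if state ∈ acc.1 then acc
    else
      let acc := (PySem.Set.add acc.1 state, PySem.Set.add acc.2 (pvXorL state))
      (pvPairs state.length).foldl
        (fun acc xy => pvDfs fuel (pvMerge state xy.1 xy.2) acc) acc

def get_unique_xor_values (n : Int) (data_packets : List Int) : Int :=
  ((pvDfs (data_packets.length + 1) data_packets (PySem.Set.empty, PySem.Set.empty)).2.length : Int)

-- ===== PORT B =====

-- splits(items): all ways to split items into two subsequences (kept, rest)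
def pvSplits : List Int → List (List Int × List Int)
  | [] => [([], [])]
  | h :: t => (pvSplits t).flatMap (fun ab => [(h :: ab.1, ab.2), (ab.1, h :: ab.2)])

-- needed by pvGo's termination proof
theorem pvSplits_len2 {t : List Int} {ab : List Int × List Int} (h : ab ∈ pvSplits t) :
    ab.2.length ≤ t.length := by
  induction t generalizing ab with
  | nil => simp [pvSplits] at h; simp [h]
  | cons e t ih =>
    simp only [pvSplits, List.mem_flatMap, List.mem_cons, List.not_mem_nil, or_false] at h
    obtain ⟨cd, hcd, h | h⟩ := h <;> subst h <;> simp <;> have := ih hcd <;> omega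

-- go(items) with the memo dict threaded through
def pvGo (items : List Int) (memo : PySem.Dict (List Int) (List Int)) :
    List Int × PySem.Dict (List Int) (List Int) :=
  match memo.get? items with
  | some v => (v, memo)
  | none =>
    let r : List Int × PySem.Dict (List Int) (List Int) :=
      match items with
      | [] => ([0], memo)
      | h :: t =>
        (pvSplits t).attach.foldl
          (fun acc ab =>
            let s := h + ab.1.1.foldl (· + ·) 0
            let r := pvGo ab.1.2 acc.2
            (r.1.foldl (fun out v => PySem.Set.add out (PySem.Int.bxor s v)) acc.1, r.2))
          (PySem.Set.empty, memo)
    (r.1, r.2.insert items r.1)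
termination_by items.length
decreasing_by
  have := pvSplits_len2 ab.2
  simp only [List.length_cons]
  omega

def get_unique_xor_values_alt (n : Int) (data_packets : List Int) : Int :=
  ((pvGo data_packets PySem.Dict.empty).1.length : Int)

-- ===== PRECONDITION & SPEC =====
def Spec_get_unique_xor_values (n : Int) (data_packets : List Int) (out : Int) : Prop := out = get_unique_xor_values_alt n data_packets
instance (n : Int) (data_packets : List Int) (out : Int) : Decidable (Spec_get_unique_xor_values n data_packets out) := by unfold Spec_get_unique_xor_values; infer_instance

-- ===== CLAIM (what is proved, stated in full; the proofs are below) =====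
def Claim_equal_get_unique_xor_values : Prop := ∀ (n : Int) (data_packets : List Int), Dom_get_unique_xor_values n data_packets → Spec_get_unique_xor_values n data_packets (get_unique_xor_values n data_packets)

-- ===== LEMMAS AND PROOFS =====

-- ---------- xor algebra ----------

theorem bxor_ofNat_negSucc (m k : Nat) :
    PySem.Int.bxor ((m : Nat) : Int) (Int.negSucc k) = Int.negSucc (m ^^^ k) := by
  have ek : (-(Int.negSucc k) - 1) = (k : Int) := by rw [Int.negSucc_eq]; ring
  have hk : ¬ (0:Int) ≤ Int.negSucc k := by rw [Int.negSucc_eq]; omega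
  unfold PySem.Int.bxor
  rw [if_pos (by positivity), if_neg hk, ek, Int.toNat_natCast, Int.toNat_natCast,
    Int.negSucc_eq]
  ring
theorem bxor_negSucc_ofNat (m k : Nat) :
    PySem.Int.bxor (Int.negSucc m) ((k : Nat) : Int) = Int.negSucc (m ^^^ k) := by
  have em : (-(Int.negSucc m) - 1) = (m : Int) := by rw [Int.negSucc_eq]; ring
  have hm : ¬ (0:Int) ≤ Int.negSucc m := by rw [Int.negSucc_eq]; omega
  unfold PySem.Int.bxor
  rw [if_neg hm, if_pos (by positivity), em, Int.toNat_natCast, Int.toNat_natCast,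
    Int.negSucc_eq]
  ring
theorem bxor_negSucc_negSucc (m k : Nat) :
    PySem.Int.bxor (Int.negSucc m) (Int.negSucc k) = ((m ^^^ k : Nat) : Int) := by
  have em : (-(Int.negSucc m) - 1) = (m : Int) := by rw [Int.negSucc_eq]; ring
  have ek : (-(Int.negSucc k) - 1) = (k : Int) := by rw [Int.negSucc_eq]; ring
  have hm : ¬ (0:Int) ≤ Int.negSucc m := by rw [Int.negSucc_eq]; omega
  have hk : ¬ (0:Int) ≤ Int.negSucc k := by rw [Int.negSucc_eq]; omega
  unfold PySem.Int.bxor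
  rw [if_neg hm, if_neg hk, em, ek, Int.toNat_natCast, Int.toNat_natCast]
theorem bxor_assoc (a b c : Int) :
    PySem.Int.bxor (PySem.Int.bxor a b) c = PySem.Int.bxor a (PySem.Int.bxor b c) := by
  cases a <;> cases b <;> cases c <;>
    simp [Int.ofNat_eq_natCast, PySem.Int.bxor_natCast, bxor_negSucc_negSucc,
      bxor_ofNat_negSucc, bxor_negSucc_ofNat, Nat.xor_assoc]


theorem bxor_left_comm (a b c : Int) :
    PySem.Int.bxor a (PySem.Int.bxor b c) = PySem.Int.bxor b (PySem.Int.bxor a c) := by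
  rw [← bxor_assoc, PySem.Int.bxor_comm a b, bxor_assoc]

theorem bxor_zero_left (a : Int) : PySem.Int.bxor 0 a = a := by
  rw [PySem.Int.bxor_comm]; exact PySem.Int.bxor_zero a

-- canonical xor of a list
def xorF (l : List Int) : Int := l.foldr PySem.Int.bxor 0

theorem xorF_nil : xorF [] = 0 := rfl
theorem xorF_cons (a : Int) (l : List Int) : xorF (a :: l) = PySem.Int.bxor a (xorF l) := rfl

theorem foldl_bxor_eq (l : List Int) (a : Int) :
    l.foldl (fun a v => PySem.Int.bxor a v) a = PySem.Int.bxor a (xorF l) := by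
  induction l generalizing a with
  | nil => simp [xorF, PySem.Int.bxor_zero]
  | cons h t ih => simp only [List.foldl_cons, ih, xorF_cons, bxor_assoc]

theorem pvXorL_eq_xorF (l : List Int) : pvXorL l = xorF l := by
  rw [pvXorL, foldl_bxor_eq, bxor_zero_left]

theorem xorF_perm {l l' : List Int} (h : l.Perm l') : xorF l = xorF l' := by
  induction h with
  | nil => rfl
  | cons a _ ih => simp [xorF_cons, ih]
  | swap a b l => simp [xorF_cons, bxor_left_comm]
  | trans _ _ ih1 ih2 => rw [ih1, ih2]

theorem xorF_zeros {l : List Int} (h : ∀ u ∈ l, u = 0) : xorF l = 0 := by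
  induction l with
  | nil => rfl
  | cons a t ih =>
    rw [xorF_cons, h a (by simp), ih (fun u hu => h u (by simp [hu])), PySem.Int.bxor_zero]

theorem xorF_append (a b : List Int) :
    xorF (a ++ b) = PySem.Int.bxor (xorF a) (xorF b) := by
  induction a with
  | nil => simp [xorF_nil, bxor_zero_left]
  | cons h t ih => simp [xorF_cons, ih, bxor_assoc]

theorem xorF_filter_ne_zero (l : List Int) :
    xorF (l.filter (fun num => decide (num ≠ 0))) = xorF l := by
  induction l with
  | nil => rfl
  | cons a t ih =>
    by_cases h : a = 0
    · subst h; simpa [List.filter_cons, xorF_cons, bxor_zero_left] using ih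
    · rw [show List.filter (fun num => decide (num ≠ 0)) (a :: t) =
          a :: List.filter (fun num => decide (num ≠ 0)) t by simp [List.filter_cons, h],
        xorF_cons, xorF_cons, ih]

-- ---------- partitions ----------

-- bs is a partition of items into nonempty blocks (both up to permutation)
def IsPart (items : List Int) (bs : List (List Int)) : Prop :=
  (∀ b ∈ bs, b ≠ []) ∧ bs.flatten.Perm items

-- the statement both programs compute the cardinality of
def PXor (items : List Int) (x : Int) : Prop :=
  ∃ bs, IsPart items bs ∧ x = xorF (bs.map List.sum)

theorem flatten_perm {α : Type} {bs bs' : List (List α)} (h : bs.Perm bs') :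
    bs.flatten.Perm bs'.flatten := by
  induction h with
  | nil => rfl
  | cons a _ ih => simpa using ih.append_left a
  | swap a b l =>
    simp only [List.flatten_cons, ← List.append_assoc]
    exact List.perm_append_comm.append_right _
  | trans _ _ ih1 ih2 => exact ih1.trans ih2

theorem isPart_singletons (items : List Int) :
    IsPart items (items.map (fun v => [v])) ∧
    (items.map (fun v => [v])).map List.sum = items := by
  constructor
  · refine ⟨fun b hb => ?_, ?_⟩
    · simp only [List.mem_map] at hb; obtain ⟨v, _, rfl⟩ := hb; simp
    · induction items with
      | nil => simp
      | cons a t ih => simpa using List.Perm.cons a ih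
  · simp [Function.comp_def]

-- extract a block by its sum, up to permutation
theorem map_perm_cons {α β : Type} [DecidableEq α] {bs : List α} {f : α → β} {a : β} {l : List β}
    (h : (bs.map f).Perm (a :: l)) :
    ∃ b bs', bs.Perm (b :: bs') ∧ f b = a ∧ (bs'.map f).Perm l := by
  have ha : a ∈ bs.map f := h.mem_iff.2 (by simp)
  obtain ⟨b, hb, rfl⟩ := List.mem_map.1 ha
  refine ⟨b, bs.erase b, List.perm_cons_erase hb, rfl, ?_⟩
  have h2 : (bs.map f).Perm (f b :: (bs.erase b).map f) :=
    (List.perm_cons_erase hb).map f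
  exact (h2.symm.trans h).cons_inv

-- ---------- lists: set / eraseIdx / indices ----------


theorem set_perm {α : Type} (l : List α) (i : Nat) (h : i < l.length) (v : α) :
    (l.set i v).Perm (v :: l.eraseIdx i) := by
  rw [List.set_eq_take_append_cons_drop, if_pos h, List.eraseIdx_eq_take_drop_succ]
  exact List.perm_middle

theorem filter_length_lt {α : Type} (p : α → Bool) {l : List α} {x : α}
    (hx : x ∈ l) (hpx : p x = false) : (l.filter p).length < l.length := by
  induction l with
  | nil => cases hx
  | cons a t ih =>
    rcases List.mem_cons.1 hx with rfl | hx'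
    · have h1 := List.length_filter_le p t
      rw [List.filter_cons, hpx]
      simp only [Bool.false_eq_true, if_false, List.length_cons]
      omega
    · have h2 := ih hx'
      rw [List.filter_cons]
      by_cases hpa : p a = true
      · rw [if_pos hpa]; simp only [List.length_cons]; omega
      · rw [if_neg hpa]; simp only [List.length_cons]; omega

theorem cons_rotate {α : Type} (h a b : α) (r : List α) :
    (h :: a :: b :: r).Perm (a :: b :: h :: r) :=
  (List.Perm.swap a h (b :: r)).trans ((List.Perm.swap b h r).cons a)

theorem set2_perm {l : List Int} {x y : Nat} (hxy : x < y) (hy : y < l.length)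
    (v w : Int) :
    ∃ r, l.Perm (l.getD x 0 :: l.getD y 0 :: r) ∧
      ((l.set y w).set x v).Perm (v :: w :: r) := by
  induction l generalizing x y with
  | nil => simp at hy
  | cons h t ih =>
    cases x with
    | zero =>
      obtain ⟨j, rfl⟩ : ∃ j, y = j + 1 := ⟨y - 1, by omega⟩
      have hj : j < t.length := by simpa using hy
      have hg : t.getD j 0 = t[j] := List.getD_eq_getElem t 0 hj
      refine ⟨t.eraseIdx j, ?_, ?_⟩
      · have h1 : t.Perm (t.getD j 0 :: t.eraseIdx j) := by
          have h2 := set_perm t j hj t[j]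
          rw [List.set_getElem_self] at h2
          rwa [hg]
        simpa using h1.cons h
      · have h1 : (t.set j w).Perm (w :: t.eraseIdx j) := set_perm t j hj w
        simpa using h1.cons v
    | succ i =>
      obtain ⟨j, rfl⟩ : ∃ j, y = j + 1 := ⟨y - 1, by omega⟩
      have hj : j < t.length := by simpa using hy
      obtain ⟨r', hp1, hp2⟩ := ih (x := i) (y := j) (by omega) hj
      refine ⟨h :: r', ?_, ?_⟩
      · have h1 := (hp1.cons h).trans (cons_rotate h (t.getD i 0) (t.getD j 0) r')
        simpa using h1
      · have h1 := (hp2.cons h).trans (cons_rotate h v w r')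
        simpa using h1

theorem idx_pair {s : List Int} {p q : Int} (h : [p, q].Subperm s) :
    ∃ x y, x < y ∧ y < s.length ∧
      ((s.getD x 0 = p ∧ s.getD y 0 = q) ∨ (s.getD x 0 = q ∧ s.getD y 0 = p)) := by
  induction s with
  | nil => have := h.length_le; simp at this
  | cons a tl ih =>
    have hcnt := List.subperm_ext_iff.1 h
    by_cases hap : a = p
    · subst hap
      have hq : q ∈ tl := by
        have h1 := hcnt q (by simp)
        by_cases hpq : q = a
        · subst hpq; simpa [List.count_cons] using h1
        · simpa [List.count_cons, hpq] using h1
      obtain ⟨j, hj, hje⟩ := List.getElem_of_mem hq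
      refine ⟨0, j + 1, by omega, by simp [Nat.lt_succ_iff]; omega, Or.inl ⟨rfl, ?_⟩⟩
      simp only [List.getD_cons_succ]
      rw [List.getD_eq_getElem tl 0 hj, hje]
    · by_cases haq : a = q
      · subst haq
        have hp : p ∈ tl := by
          have h1 := hcnt p (by simp)
          have hpa : ¬ p = a := fun hh => hap hh.symm
          simpa [List.count_cons, hpa, hap] using h1
        obtain ⟨j, hj, hje⟩ := List.getElem_of_mem hp
        refine ⟨0, j + 1, by omega, by simp [Nat.lt_succ_iff]; omega, Or.inr ⟨rfl, ?_⟩⟩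
        simp only [List.getD_cons_succ]
        rw [List.getD_eq_getElem tl 0 hj, hje]
      · have h' : [p, q].Subperm tl := by
          rw [List.subperm_ext_iff]
          intro b hb
          have h1 := hcnt b hb
          have hba : ¬ b = a := by
            rcases List.mem_cons.1 hb with rfl | hb'
            · exact fun hh => hap hh.symm
            · have hbq : b = q := by simpa using hb'
              subst hbq; exact fun hh => haq hh.symm
          rwa [List.count_cons_of_ne (fun hh => hba hh.symm)] at h1
        obtain ⟨x', y', hxy, hy, hval⟩ := ih h'
        refine ⟨x' + 1, y' + 1, by omega, by simp [Nat.lt_succ_iff]; omega, ?_⟩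
        simpa using hval


theorem mem_pvPairs {n x y : Nat} : (x, y) ∈ pvPairs n ↔ x < y ∧ y < n := by
  simp only [pvPairs, List.mem_flatMap, List.mem_map, List.mem_filter, List.mem_range]
  constructor
  · rintro ⟨x', _, ⟨y', ⟨hy', hlt⟩, heq⟩⟩
    obtain ⟨rfl, rfl⟩ := Prod.mk.injEq .. ▸ heq
    exact ⟨by simpa using hlt, hy'⟩
  · rintro ⟨hxy, hy⟩
    exact ⟨x, by omega, y, ⟨hy, by simpa using hxy⟩, rfl⟩

def pvSuccs (s : List Int) : List (List Int) :=
  (pvPairs s.length).map (fun xy => pvMerge s xy.1 xy.2)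

inductive ReachP (dp : List Int) : List Int → Prop where
  | base : ReachP dp (pvSortI dp)
  | step {s t : List Int} : ReachP dp s → t ∈ pvSuccs s → ReachP dp t

theorem pvSortI_perm (l : List Int) : (pvSortI l).Perm l := PySem.List.sorted_perm l (fun x => x) false

theorem pvSortI_idem (l : List Int) : pvSortI (pvSortI l) = pvSortI l :=
  PySem.List.sorted_sorted l (fun x => x)

theorem pvSortI_length (l : List Int) : (pvSortI l).length = l.length :=
  (pvSortI_perm l).length_eq

theorem pvMerge_sorted (s : List Int) (x y : Nat) : pvSortI (pvMerge s x y) = pvMerge s x y := by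
  simp [pvMerge, pvSortI_idem]

theorem pvSuccs_sorted {s t : List Int} (h : t ∈ pvSuccs s) : pvSortI t = t := by
  simp only [pvSuccs, List.mem_map] at h
  obtain ⟨xy, _, rfl⟩ := h
  exact pvMerge_sorted s xy.1 xy.2

theorem pvSuccs_length {s t : List Int} (h : t ∈ pvSuccs s) : t.length < s.length := by
  simp only [pvSuccs, List.mem_map] at h
  obtain ⟨xy, hxy, rfl⟩ := h
  obtain ⟨x, y⟩ := xy
  obtain ⟨hx, hy⟩ := mem_pvPairs.1 hxy
  simp only [pvMerge, pvSortI_length]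
  have hlen : ((s.set y (s.getD y 0 + s.getD x 0)).set x 0).length = s.length := by simp
  have h0 : (0 : Int) ∈ (s.set y (s.getD y 0 + s.getD x 0)).set x 0 := by
    have hxl : x < ((s.set y (s.getD y 0 + s.getD x 0)).set x 0).length := by omega
    have hg : ((s.set y (s.getD y 0 + s.getD x 0)).set x 0)[x] = 0 :=
      List.getElem_set_self hxl
    have hmem := List.getElem_mem hxl
    rwa [hg] at hmem
  have := filter_length_lt (fun num => decide (num ≠ 0)) h0 (by simp)
  omega

-- reachable states carry partition XORs, and vice versa
theorem reach_to_part {dp s : List Int} (h : ReachP dp s) :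
    ∃ bs z, IsPart dp bs ∧ (∀ u ∈ z, u = 0) ∧ (bs.map List.sum).Perm (s ++ z) := by
  induction h with
  | base =>
    refine ⟨dp.map (fun v => [v]), [], (isPart_singletons dp).1, by simp, ?_⟩
    rw [(isPart_singletons dp).2, List.append_nil]
    exact (pvSortI_perm dp).symm
  | @step s t hs ht ih =>
    obtain ⟨bs, z, hpart, hz, hperm⟩ := ih
    simp only [pvSuccs, List.mem_map] at ht
    obtain ⟨xy, hxy, rfl⟩ := ht
    obtain ⟨x, y⟩ := xy
    obtain ⟨hx, hy⟩ := mem_pvPairs.1 hxy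
    set p := s.getD x 0 with hp
    set q := s.getD y 0 with hq
    obtain ⟨r, hsp, hns⟩ := set2_perm hx hy 0 (q + p)
    -- extract the two blocks with sums p and q
    have hperm1 : (bs.map List.sum).Perm (p :: q :: (r ++ z)) := by
      refine hperm.trans ?_
      have h1 : (s ++ z).Perm ((p :: q :: r) ++ z) := hsp.append_right z
      simpa using h1
    obtain ⟨b1, bs1, hbs1, hsum1, hperm2⟩ := map_perm_cons hperm1
    obtain ⟨b2, bs2, hbs2, hsum2, hperm3⟩ := map_perm_cons hperm2
    have hbsperm : bs.Perm (b1 :: b2 :: bs2) := hbs1.trans (hbs2.cons b1)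
    -- the merged partition
    refine ⟨(b1 ++ b2) :: bs2,
      ((q + p) :: r).filter (fun num => !(decide (num ≠ 0))) ++ z, ⟨?_, ?_⟩, ?_, ?_⟩
    · intro b hb
      rcases List.mem_cons.1 hb with rfl | hb'
      · have hb1 : b1 ≠ [] := hpart.1 b1 (hbsperm.symm.subset (by simp))
        simp [hb1]
      · exact hpart.1 b (hbsperm.symm.subset (by simp [hb']))
    · have he : (((b1 ++ b2) :: bs2).flatten) = ((b1 :: b2 :: bs2).flatten) := by
        simp [List.append_assoc]
      rw [he]
      exact (flatten_perm hbsperm.symm).trans hpart.2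
    · intro u hu
      rcases List.mem_append.1 hu with hu' | hu'
      · have := List.of_mem_filter hu'
        simpa using this
      · exact hz u hu'
    · -- sums: (p + q) :: map sum bs2  ~  t ++ leftovers ++ z
      have hsum : ((b1 ++ b2) :: bs2).map List.sum = (p + q) :: bs2.map List.sum := by
        simp [List.sum_append, hsum1, hsum2]
      rw [hsum]
      have htm : (pvMerge s x y).Perm
          (((q + p) :: r).filter (fun num => decide (num ≠ 0))) := by
        have h1 : (pvMerge s x y).Perm
            (((s.set y (q + p)).set x 0).filter (fun num => decide (num ≠ 0))) :=
          pvSortI_perm _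
        refine h1.trans ?_
        have h2 := hns.filter (fun num => decide (num ≠ 0))
        simpa using h2
      -- target: (p+q) :: map sums ~ (filter ≠ 0 ((q+p)::r) ++ filter = 0 ((q+p)::r)) ++ z
      have hfp := List.filter_append_perm (fun num => decide (num ≠ 0)) ((q + p) :: r)
      set F := ((q + p) :: r).filter (fun num => decide (num ≠ 0)) with hF
      set G := ((q + p) :: r).filter (fun num => !(decide (num ≠ 0))) with hG
      have c1 : ((p + q) :: bs2.map List.sum).Perm ((p + q) :: (r ++ z)) :=
        hperm3.cons _
      have c2 : ((p + q) :: (r ++ z)) = ((q + p) :: r) ++ z := by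
        rw [Int.add_comm p q]; rfl
      have c3 : (((q + p) :: r) ++ z).Perm ((F ++ G) ++ z) := hfp.symm.append_right z
      have c4 : (F ++ G) ++ z = F ++ (G ++ z) := by rw [List.append_assoc]
      have c5 : (F ++ (G ++ z)).Perm (pvMerge s x y ++ (G ++ z)) :=
        htm.symm.append_right _
      exact c1.trans (c2 ▸ (c3.trans (c4 ▸ c5)))

theorem reach_xor_pxor {dp s : List Int} (h : ReachP dp s) : PXor dp (pvXorL s) := by
  obtain ⟨bs, z, hpart, hz, hperm⟩ := reach_to_part h
  refine ⟨bs, hpart, ?_⟩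
  rw [pvXorL_eq_xorF, xorF_perm hperm, xorF_append, xorF_zeros hz, PySem.Int.bxor_zero]

theorem blocks_len_le {bs : List (List Int)} (h : ∀ b ∈ bs, b ≠ []) :
    bs.length ≤ bs.flatten.length := by
  induction bs with
  | nil => simp
  | cons b rest ih =>
    have hb := h b (by simp)
    have hrest := ih (fun b' hb' => h b' (by simp [hb']))
    have : 1 ≤ b.length := by
      cases b with
      | nil => exact absurd rfl hb
      | cons u w => simp
    simp only [List.flatten_cons, List.length_append, List.length_cons]
    omega

theorem map_sum_eq_flatten {bs : List (List Int)} (hne : ∀ b ∈ bs, b ≠ [])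
    (hall : ∀ b ∈ bs, b.length ≤ 1) : bs.map List.sum = bs.flatten := by
  induction bs with
  | nil => simp
  | cons b rest ih =>
    have hb := hne b (by simp)
    have h1 := hall b (by simp)
    obtain ⟨u, rfl⟩ : ∃ u, b = [u] := by
      cases b with
      | nil => exact absurd rfl hb
      | cons u w =>
        cases w with
        | nil => exact ⟨u, rfl⟩
        | cons v w' => simp at h1
    have ih' := ih (fun b' hb' => hne b' (by simp [hb']))
      (fun b' hb' => hall b' (by simp [hb']))
    simp [ih']

theorem part_single_case {dp : List Int} {bs : List (List Int)} (hp : IsPart dp bs)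
    (hall : ∀ b ∈ bs, b.length ≤ 1) :
    ∃ s, ReachP dp s ∧
      ((bs.map List.sum).filter (fun num => decide (num ≠ 0))).Perm
        (s.filter (fun num => decide (num ≠ 0))) := by
  refine ⟨pvSortI dp, ReachP.base, ?_⟩
  rw [map_sum_eq_flatten hp.1 hall]
  exact (hp.2.trans (pvSortI_perm dp).symm).filter _

theorem part_to_reach {dp : List Int} {bs : List (List Int)} (h : IsPart dp bs) :
    ∃ s, ReachP dp s ∧
      ((bs.map List.sum).filter (fun num => decide (num ≠ 0))).Perm
        (s.filter (fun num => decide (num ≠ 0))) := by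
  have main : ∀ k (bs : List (List Int)), IsPart dp bs → dp.length - bs.length ≤ k →
      ∃ s, ReachP dp s ∧
        ((bs.map List.sum).filter (fun num => decide (num ≠ 0))).Perm
          (s.filter (fun num => decide (num ≠ 0))) := by
    intro k
    induction k with
    | zero =>
      intro bs hp hk
      refine part_single_case hp ?_
      by_contra hex
      push_neg at hex
      obtain ⟨b, hb, hb2⟩ := hex
      -- a block of length ≥ 2 forces bs.length < dp.length, contradicting the bound
      have hbs2 : bs.Perm (b :: bs.erase b) := List.perm_cons_erase hb
      have hlen1 : (bs.erase b).length ≤ (bs.erase b).flatten.length :=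
        blocks_len_le (fun b' hb' => hp.1 b' (hbs2.symm.subset (by simp [hb'])))
      have hlen3 : bs.flatten.length = (b :: bs.erase b).flatten.length :=
        (flatten_perm hbs2).length_eq
      have hlen4 : (b :: bs.erase b).flatten.length = b.length + (bs.erase b).flatten.length := by
        simp
      have hlen5 : bs.length = (bs.erase b).length + 1 := by
        rw [hbs2.length_eq]; simp
      have hdp : dp.length = bs.flatten.length := hp.2.length_eq.symm
      omega
    | succ k ih =>
      intro bs hp hk
      by_cases hex : ∃ b ∈ bs, 2 ≤ b.length
      · obtain ⟨b, hb, hb2⟩ := hex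
        obtain ⟨u, v, w, rfl⟩ : ∃ u v w, b = u :: v :: w := by
          cases b with
          | nil => simp at hb2
          | cons u b' =>
            cases b' with
            | nil => simp at hb2
            | cons v w => exact ⟨u, v, w, rfl⟩
        set bs2 := bs.erase (u :: v :: w) with hbs2def
        have hbs2 : bs.Perm ((u :: v :: w) :: bs2) := List.perm_cons_erase hb
        have hmem2 : ∀ b' ∈ bs2, b' ∈ bs := fun b' hb' => hbs2.symm.subset (by simp [hb'])
        -- the finer partition: split off the head of the big block
        have hp0 : IsPart dp ([u] :: (v :: w) :: bs2) := by
          refine ⟨?_, ?_⟩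
          · intro b' hb'
            rcases List.mem_cons.1 hb' with rfl | hb' <;> [simp; skip]
            rcases List.mem_cons.1 hb' with rfl | hb' <;> [simp; exact hp.1 b' (hmem2 b' hb')]
          · have he : ([u] :: (v :: w) :: bs2).flatten = ((u :: v :: w) :: bs2).flatten := by simp
            rw [he]
            exact (flatten_perm hbs2.symm).trans hp.2
        have hlt : bs.length < dp.length := by
          have hlen1 : bs2.length ≤ bs2.flatten.length :=
            blocks_len_le (fun b' hb' => hp.1 b' (hmem2 b' hb'))
          have hlen3 : bs.flatten.length = ((u :: v :: w) :: bs2).flatten.length :=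
            (flatten_perm hbs2).length_eq
          have hlen5 : bs.length = bs2.length + 1 := by rw [hbs2.length_eq]; simp
          have hdp : dp.length = bs.flatten.length := hp.2.length_eq.symm
          simp only [List.flatten_cons, List.length_append, List.length_cons] at hlen3
          omega
        have hmeas : dp.length - ([u] :: (v :: w) :: bs2).length ≤ k := by
          have hlen5 : bs.length = bs2.length + 1 := by rw [hbs2.length_eq]; simp
          simp only [List.length_cons]
          omega
        obtain ⟨s0, hr0, hperm0⟩ := ih _ hp0 hmeas
        set p := u with hpdef
        set q := (v :: w).sum with hqdef
        set rest := bs2.map List.sum with hrestdef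
        have hmap0 : ([u] :: (v :: w) :: bs2).map List.sum = p :: q :: rest := by
          simp [hpdef, hqdef, hrestdef]
        rw [hmap0] at hperm0
        have htgt : ((bs.map List.sum).filter (fun num => decide (num ≠ 0))).Perm
            (((p + q) :: rest).filter (fun num => decide (num ≠ 0))) := by
          have h1 : (bs.map List.sum).Perm ((p + q) :: rest) := by
            have := hbs2.map List.sum
            simpa [hpdef, hqdef, hrestdef] using this
          exact h1.filter _
        by_cases hpz : p = 0
        · refine ⟨s0, hr0, htgt.trans ?_⟩
          have he : ((p + q) :: rest).filter (fun num => decide (num ≠ 0)) =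
              (p :: q :: rest).filter (fun num => decide (num ≠ 0)) := by
            simp [List.filter_cons, hpz]
          rw [he]
          exact hperm0
        · by_cases hqz : q = 0
          · refine ⟨s0, hr0, htgt.trans ?_⟩
            have he : ((p + q) :: rest).filter (fun num => decide (num ≠ 0)) =
                (p :: q :: rest).filter (fun num => decide (num ≠ 0)) := by
              simp [List.filter_cons, hpz, hqz]
            rw [he]
            exact hperm0
          · -- both block sums are nonzero: do one actual merge on s0
            have hflt0 : (p :: q :: rest).filter (fun num => decide (num ≠ 0)) =
                p :: q :: rest.filter (fun num => decide (num ≠ 0)) := by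
              simp [List.filter_cons, hpz, hqz]
            rw [hflt0] at hperm0
            have hsub : [p, q].Subperm s0 := by
              have hsl : [p, q].Sublist
                  (p :: q :: rest.filter (fun num => decide (num ≠ 0))) :=
                ((List.nil_sublist _).cons₂ q).cons₂ p
              exact (hsl.subperm.trans hperm0.subperm).trans
                List.filter_sublist.subperm
            obtain ⟨x, y, hxy, hy, hval⟩ := idx_pair hsub
            refine ⟨pvMerge s0 x y, ReachP.step hr0 ?_, ?_⟩
            · simp only [pvSuccs, List.mem_map]
              exact ⟨(x, y), mem_pvPairs.2 ⟨hxy, hy⟩, rfl⟩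
            · obtain ⟨r, hsp, hns⟩ := set2_perm hxy hy 0 (s0.getD y 0 + s0.getD x 0)
              have hba : s0.getD y 0 + s0.getD x 0 = p + q := by
                rcases hval with ⟨ha, hb'⟩ | ⟨ha, hb'⟩ <;> rw [ha, hb'] <;> ring
              -- filter ≠ 0 of r matches filter ≠ 0 of rest
              have hfr : (r.filter (fun num => decide (num ≠ 0))).Perm
                  (rest.filter (fun num => decide (num ≠ 0))) := by
                have h1 : (s0.filter (fun num => decide (num ≠ 0))).Perm
                    ((s0.getD x 0 :: s0.getD y 0 :: r).filter
                      (fun num => decide (num ≠ 0))) := hsp.filter _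
                rcases hval with ⟨ha, hb'⟩ | ⟨ha, hb'⟩
                · rw [ha, hb'] at h1
                  have h2 : (s0.filter (fun num => decide (num ≠ 0))).Perm
                      (p :: q :: r.filter (fun num => decide (num ≠ 0))) := by
                    have he : (p :: q :: r).filter (fun num => decide (num ≠ 0)) =
                        p :: q :: r.filter (fun num => decide (num ≠ 0)) := by
                      simp [List.filter_cons, hpz, hqz]
                    rw [he] at h1; exact h1
                  exact (((hperm0.trans h2).cons_inv).cons_inv).symm
                · rw [ha, hb'] at h1
                  have h2 : (s0.filter (fun num => decide (num ≠ 0))).Perm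
                      (p :: q :: r.filter (fun num => decide (num ≠ 0))) := by
                    have he : (q :: p :: r).filter (fun num => decide (num ≠ 0)) =
                        q :: p :: r.filter (fun num => decide (num ≠ 0)) := by
                      simp [List.filter_cons, hpz, hqz]
                    rw [he] at h1
                    exact h1.trans (List.Perm.swap p q _)
                  exact (((hperm0.trans h2).cons_inv).cons_inv).symm
              -- the merged state, up to zero-filtering
              have htm : (pvMerge s0 x y).Perm
                  (((p + q) :: r).filter (fun num => decide (num ≠ 0))) := by
                have h1 : (pvMerge s0 x y).Perm
                    (((s0.set y (s0.getD y 0 + s0.getD x 0)).set x 0).filter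
                      (fun num => decide (num ≠ 0))) := pvSortI_perm _
                refine h1.trans ?_
                rw [hba] at hns ⊢
                have h2 := hns.filter (fun num => decide (num ≠ 0))
                simpa using h2
              have hmt : ((pvMerge s0 x y).filter (fun num => decide (num ≠ 0))) =
                  pvMerge s0 x y := by
                rw [List.filter_eq_self]
                intro a ha
                have ha2 := htm.subset ha
                simp only [List.mem_filter] at ha2
                exact ha2.2
              rw [hmt]
              refine htgt.trans ?_
              by_cases hsz : p + q = 0
              · have he1 : ((p + q) :: rest).filter (fun num => decide (num ≠ 0)) =
                    rest.filter (fun num => decide (num ≠ 0)) := by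
                  simp [List.filter_cons, hsz]
                have he2 : ((p + q) :: r).filter (fun num => decide (num ≠ 0)) =
                    r.filter (fun num => decide (num ≠ 0)) := by
                  simp [List.filter_cons, hsz]
                rw [he1]
                exact (hfr.symm).trans (he2 ▸ htm.symm)
              · have he1 : ((p + q) :: rest).filter (fun num => decide (num ≠ 0)) =
                    (p + q) :: rest.filter (fun num => decide (num ≠ 0)) := by
                  simp [List.filter_cons, hsz]
                have he2 : ((p + q) :: r).filter (fun num => decide (num ≠ 0)) =
                    (p + q) :: r.filter (fun num => decide (num ≠ 0)) := by
                  simp [List.filter_cons, hsz]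
                rw [he1]
                refine ((hfr.symm).cons (p + q)).trans ?_
                exact (he2 ▸ htm.symm)
      · push_neg at hex
        exact part_single_case hp (fun b hb => by have := hex b hb; omega)
  exact main (dp.length - bs.length) bs h le_rfl

theorem pxor_to_reach {dp : List Int} {x : Int} (h : PXor dp x) :
    ∃ s, ReachP dp s ∧ x = pvXorL s := by
  obtain ⟨bs, hpart, rfl⟩ := h
  obtain ⟨s, hr, hperm⟩ := part_to_reach hpart
  refine ⟨s, hr, ?_⟩
  rw [pvXorL_eq_xorF, ← xorF_filter_ne_zero (bs.map List.sum), xorF_perm hperm,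
    xorF_filter_ne_zero]

-- ---------- port-A search correctness ----------

def DfsP (dp : List Int) (fuel : Nat) : Prop :=
  ∀ u V X,
    ((∀ v ∈ V, v ∈ (pvDfs fuel u (V, X)).1) ∧ (∀ x ∈ X, x ∈ (pvDfs fuel u (V, X)).2)) ∧
    (X.Nodup → (pvDfs fuel u (V, X)).2.Nodup) ∧
    (ReachP dp (pvSortI u) → (∀ v ∈ V, ReachP dp v) →
      (∀ x ∈ X, ∃ s, ReachP dp s ∧ x = pvXorL s) →
      (∀ v ∈ (pvDfs fuel u (V, X)).1, ReachP dp v) ∧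
      (∀ x ∈ (pvDfs fuel u (V, X)).2, ∃ s, ReachP dp s ∧ x = pvXorL s)) ∧
    (fuel ≥ (pvSortI u).length + 1 →
      pvSortI u ∈ (pvDfs fuel u (V, X)).1 ∧
      ∀ v ∈ (pvDfs fuel u (V, X)).1, v ∈ V ∨
        ((∀ t ∈ pvSuccs v, t ∈ (pvDfs fuel u (V, X)).1) ∧ pvXorL v ∈ (pvDfs fuel u (V, X)).2))

theorem dfsP_all (dp : List Int) (fuel : Nat) : DfsP dp fuel := by
  induction fuel with
  | zero =>
    intro u V X
    refine ⟨⟨fun v hv => hv, fun x hx => hx⟩, fun h => h, fun _ h2 h3 => ⟨h2, h3⟩, ?_⟩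
    intro hge
    omega
  | succ fuel ih =>
    intro u V X
    by_cases hmem : pvSortI u ∈ V
    · have hr : pvDfs (fuel + 1) u (V, X) = (V, X) := by
        simp [pvDfs, hmem]
      rw [hr]
      exact ⟨⟨fun v hv => hv, fun x hx => hx⟩, fun h => h, fun _ h2 h3 => ⟨h2, h3⟩,
        fun _ => ⟨hmem, fun v hv => Or.inl hv⟩⟩
    · set state := pvSortI u with hstate
      set f : (PySem.Set (List Int) × PySem.Set Int) → (Nat × Nat) →
          (PySem.Set (List Int) × PySem.Set Int) :=
        fun acc xy => pvDfs fuel (pvMerge state xy.1 xy.2) acc with hf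
      set acc0 : PySem.Set (List Int) × PySem.Set Int :=
        (PySem.Set.add V state, PySem.Set.add X (pvXorL state)) with hacc0
      have hr : pvDfs (fuel + 1) u (V, X) = (pvPairs state.length).foldl f acc0 := by
        simp [pvDfs, hmem, ← hstate, hf, hacc0]
      rw [hr]
      -- single-step facts from the induction hypothesis
      have ihm : ∀ t (acc : PySem.Set (List Int) × PySem.Set Int),
          (∀ v ∈ acc.1, v ∈ (pvDfs fuel t acc).1) ∧ (∀ x ∈ acc.2, x ∈ (pvDfs fuel t acc).2) :=
        fun t acc => (ih t acc.1 acc.2).1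
      have ihnd : ∀ t (acc : PySem.Set (List Int) × PySem.Set Int),
          acc.2.Nodup → (pvDfs fuel t acc).2.Nodup :=
        fun t acc => (ih t acc.1 acc.2).2.1
      have ihs : ∀ t (acc : PySem.Set (List Int) × PySem.Set Int),
          ReachP dp (pvSortI t) → (∀ v ∈ acc.1, ReachP dp v) →
          (∀ x ∈ acc.2, ∃ s, ReachP dp s ∧ x = pvXorL s) →
          (∀ v ∈ (pvDfs fuel t acc).1, ReachP dp v) ∧
          (∀ x ∈ (pvDfs fuel t acc).2, ∃ s, ReachP dp s ∧ x = pvXorL s) :=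
        fun t acc => (ih t acc.1 acc.2).2.2.1
      have ihc : ∀ t (acc : PySem.Set (List Int) × PySem.Set Int),
          fuel ≥ (pvSortI t).length + 1 →
          pvSortI t ∈ (pvDfs fuel t acc).1 ∧
          ∀ v ∈ (pvDfs fuel t acc).1, v ∈ acc.1 ∨
            ((∀ t' ∈ pvSuccs v, t' ∈ (pvDfs fuel t acc).1) ∧ pvXorL v ∈ (pvDfs fuel t acc).2) :=
        fun t acc => (ih t acc.1 acc.2).2.2.2
      have hsuccmem : ∀ xy ∈ pvPairs state.length, pvMerge state xy.1 xy.2 ∈ pvSuccs state := by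
        intro xy hxy
        simp only [pvSuccs, List.mem_map]
        exact ⟨xy, hxy, rfl⟩
      -- fold lemmas
      have foldMono : ∀ (L : List (Nat × Nat)) acc,
          (∀ v ∈ acc.1, v ∈ (L.foldl f acc).1) ∧ (∀ x ∈ acc.2, x ∈ (L.foldl f acc).2) := by
        intro L
        induction L with
        | nil => exact fun acc => ⟨fun v hv => hv, fun x hx => hx⟩
        | cons xy L' ihL =>
          intro acc
          refine ⟨fun v hv => ?_, fun x hx => ?_⟩
          · exact (ihL (f acc xy)).1 v ((ihm _ acc).1 v hv)
          · exact (ihL (f acc xy)).2 x ((ihm _ acc).2 x hx)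
      have foldNodup : ∀ (L : List (Nat × Nat)) acc,
          acc.2.Nodup → ((L.foldl f acc).2).Nodup := by
        intro L
        induction L with
        | nil => exact fun acc h => h
        | cons xy L' ihL => exact fun acc h => ihL (f acc xy) (ihnd _ acc h)
      have foldSound : ∀ (L : List (Nat × Nat)), (∀ xy ∈ L, xy ∈ pvPairs state.length) →
          ∀ acc, ReachP dp state → (∀ v ∈ acc.1, ReachP dp v) →
          (∀ x ∈ acc.2, ∃ s, ReachP dp s ∧ x = pvXorL s) →
          (∀ v ∈ (L.foldl f acc).1, ReachP dp v) ∧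
          (∀ x ∈ (L.foldl f acc).2, ∃ s, ReachP dp s ∧ x = pvXorL s) := by
        intro L
        induction L with
        | nil => exact fun _ acc _ h2 h3 => ⟨h2, h3⟩
        | cons xy L' ihL =>
          intro hL acc hreach h2 h3
          have ht : pvMerge state xy.1 xy.2 ∈ pvSuccs state := hsuccmem xy (hL xy (by simp))
          have hrt : ReachP dp (pvSortI (pvMerge state xy.1 xy.2)) := by
            rw [pvSuccs_sorted ht]
            exact ReachP.step hreach ht
          have hstep := ihs _ acc hrt h2 h3
          exact ihL (fun xy' hxy' => hL xy' (by simp [hxy'])) (f acc xy) hreach hstep.1 hstep.2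
      have foldIn : ∀ (L : List (Nat × Nat)), (∀ xy ∈ L, xy ∈ pvPairs state.length) →
          fuel ≥ state.length → ∀ acc, ∀ xy ∈ L,
          pvMerge state xy.1 xy.2 ∈ (L.foldl f acc).1 := by
        intro L
        induction L with
        | nil => simp
        | cons xy0 L' ihL =>
          intro hL hfuel acc xy hxy
          rcases List.mem_cons.1 hxy with rfl | hxy'
          · have ht : pvMerge state xy.1 xy.2 ∈ pvSuccs state := hsuccmem xy (hL xy (by simp))
            have hlen := pvSuccs_length ht
            have hchild := (ihc (pvMerge state xy.1 xy.2) acc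
              (by rw [pvSuccs_sorted ht]; omega)).1
            rw [pvSuccs_sorted ht] at hchild
            exact (foldMono L' (f acc xy)).1 _ hchild
          · exact ihL (fun xy' hxy' => hL xy' (by simp [hxy'])) hfuel (f acc xy0) xy hxy'
      have foldQ : ∀ (L : List (Nat × Nat)), (∀ xy ∈ L, xy ∈ pvPairs state.length) →
          fuel ≥ state.length → ∀ acc,
          (∀ v ∈ acc.1, v ∈ V ∨ v = state ∨
            ((∀ t ∈ pvSuccs v, t ∈ acc.1) ∧ pvXorL v ∈ acc.2)) →
          (∀ v ∈ (L.foldl f acc).1, v ∈ V ∨ v = state ∨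
            ((∀ t ∈ pvSuccs v, t ∈ (L.foldl f acc).1) ∧ pvXorL v ∈ (L.foldl f acc).2)) := by
        intro L
        induction L with
        | nil => exact fun _ _ acc h => h
        | cons xy L' ihL =>
          intro hL hfuel acc hQ
          have ht : pvMerge state xy.1 xy.2 ∈ pvSuccs state := hsuccmem xy (hL xy (by simp))
          have hlen := pvSuccs_length ht
          have hchild := ihc (pvMerge state xy.1 xy.2) acc (by rw [pvSuccs_sorted ht]; omega)
          refine ihL (fun xy' hxy' => hL xy' (by simp [hxy'])) hfuel (f acc xy) ?_
          intro v hv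
          rcases hchild.2 v hv with hv' | hclosed
          · rcases hQ v hv' with h | h | ⟨hcl, hx⟩
            · exact Or.inl h
            · exact Or.inr (Or.inl h)
            · exact Or.inr (Or.inr ⟨fun t' ht' => (ihm _ acc).1 t' (hcl t' ht'),
                (ihm _ acc).2 _ hx⟩)
          · exact Or.inr (Or.inr hclosed)
      refine ⟨⟨fun v hv => ?_, fun x hx => ?_⟩, fun hnd => ?_, fun hreach h2 h3 => ?_, fun hge => ?_⟩
      · exact (foldMono _ acc0).1 v (by simp [hacc0, PySem.Set.mem_add, hv])
      · exact (foldMono _ acc0).2 x (by simp [hacc0, PySem.Set.mem_add, hx])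
      · exact foldNodup _ acc0 (by simpa [hacc0] using PySem.Set.nodup_add X (pvXorL state) hnd)
      · refine foldSound _ (fun xy h => h) acc0 hreach ?_ ?_
        · intro v hv
          rcases (PySem.Set.mem_add _ _ _).1 hv with hv' | rfl
          · exact h2 v hv'
          · exact hreach
        · intro x hx
          rcases (PySem.Set.mem_add _ _ _).1 hx with hx' | rfl
          · exact h3 x hx'
          · exact ⟨state, hreach, rfl⟩
      · have hfuel : fuel ≥ state.length := by omega
        have hin : state ∈ ((pvPairs state.length).foldl f acc0).1 :=
          (foldMono _ acc0).1 state (by simp [hacc0, PySem.Set.mem_add])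
        refine ⟨hin, ?_⟩
        intro v hv
        have hQ0 : ∀ v ∈ acc0.1, v ∈ V ∨ v = state ∨
            ((∀ t ∈ pvSuccs v, t ∈ acc0.1) ∧ pvXorL v ∈ acc0.2) := by
          intro v hv
          rcases (PySem.Set.mem_add _ _ _).1 hv with hv' | rfl
          · exact Or.inl hv'
          · exact Or.inr (Or.inl rfl)
        rcases foldQ _ (fun xy h => h) hfuel acc0 hQ0 v hv with h | h | h
        · exact Or.inl h
        · subst h
          refine Or.inr ⟨?_, ?_⟩
          · intro t ht
            simp only [pvSuccs, List.mem_map] at ht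
            obtain ⟨xy, hxy, rfl⟩ := ht
            exact foldIn _ (fun xy h => h) hfuel acc0 xy hxy
          · exact (foldMono _ acc0).2 _ (by simp [hacc0, PySem.Set.mem_add])
        · exact Or.inr h

-- full characterisation of port A's xor_values
theorem dfs_final (dp : List Int) :
    (pvDfs (dp.length + 1) dp (PySem.Set.empty, PySem.Set.empty)).2.Nodup ∧
    ∀ x, x ∈ (pvDfs (dp.length + 1) dp (PySem.Set.empty, PySem.Set.empty)).2 ↔ PXor dp x := by
  have P := dfsP_all dp (dp.length + 1) dp PySem.Set.empty PySem.Set.empty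
  have hfuel : dp.length + 1 ≥ (pvSortI dp).length + 1 := by rw [pvSortI_length]
  have hsound := P.2.2.1 ReachP.base (by intro v hv; simp [PySem.Set.empty] at hv)
    (by intro x hx; simp [PySem.Set.empty] at hx)
  have hcompl := P.2.2.2 hfuel
  have hclosed : ∀ v ∈ (pvDfs (dp.length + 1) dp (PySem.Set.empty, PySem.Set.empty)).1,
      (∀ t ∈ pvSuccs v, t ∈ (pvDfs (dp.length + 1) dp (PySem.Set.empty, PySem.Set.empty)).1) ∧
      pvXorL v ∈ (pvDfs (dp.length + 1) dp (PySem.Set.empty, PySem.Set.empty)).2 := by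
    intro v hv
    rcases hcompl.2 v hv with h | h
    · simp [PySem.Set.empty] at h
    · exact h
  have hreachsub : ∀ s, ReachP dp s →
      s ∈ (pvDfs (dp.length + 1) dp (PySem.Set.empty, PySem.Set.empty)).1 := by
    intro s hs
    induction hs with
    | base => exact hcompl.1
    | step hs' ht ihs => exact (hclosed _ ihs).1 _ ht
  refine ⟨P.2.1 (by simp [PySem.Set.empty]), fun x => ⟨fun hx => ?_, fun hx => ?_⟩⟩
  · obtain ⟨s, hs, rfl⟩ := hsound.2 x hx
    exact reach_xor_pxor hs
  · obtain ⟨s, hs, rfl⟩ := pxor_to_reach hx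
    exact (hclosed s (hreachsub s hs)).2

-- ---------- port B ----------

theorem pvSplits_mem_cons {t : List Int} {ab : List Int × List Int} (e : Int)
    (h : ab ∈ pvSplits t) :
    (e :: ab.1, ab.2) ∈ pvSplits (e :: t) ∧ (ab.1, e :: ab.2) ∈ pvSplits (e :: t) := by
  constructor <;> · simp only [pvSplits, List.mem_flatMap]; exact ⟨ab, h, by simp⟩

theorem pvSplits_perm {t : List Int} {ab : List Int × List Int} (h : ab ∈ pvSplits t) :
    (ab.1 ++ ab.2).Perm t := by
  induction t generalizing ab with
  | nil => simp [pvSplits] at h; simp [h]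
  | cons e t ih =>
    simp only [pvSplits, List.mem_flatMap, List.mem_cons, List.not_mem_nil, or_false] at h
    obtain ⟨cd, hcd, h | h⟩ := h <;> subst h
    · simpa using (ih hcd).cons e
    · exact List.perm_middle.trans ((ih hcd).cons e)

theorem pvSplits_surj {t c d : List Int} (h : (c ++ d).Perm t) :
    ∃ ab ∈ pvSplits t, ab.1.Perm c ∧ ab.2.Perm d := by
  induction t generalizing c d with
  | nil =>
    have h0 : c ++ d = [] := h.eq_nil
    obtain ⟨rfl, rfl⟩ := List.append_eq_nil_iff.1 h0
    exact ⟨([], []), by simp [pvSplits]⟩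
  | cons e t' ih =>
    have he : e ∈ c ++ d := h.symm.subset (by simp)
    rcases List.mem_append.1 he with hec | hed
    · have hc : c.Perm (e :: c.erase e) := List.perm_cons_erase hec
      have h2 : (c.erase e ++ d).Perm t' := by
        have h3 : (c ++ d).Perm (e :: (c.erase e ++ d)) := by
          have := hc.append_right d
          simpa using this
        exact (h3.symm.trans h).cons_inv
      obtain ⟨ab, hab, h4, h5⟩ := ih h2
      exact ⟨(e :: ab.1, ab.2), (pvSplits_mem_cons e hab).1,
        (h4.cons e).trans hc.symm, h5⟩
    · have hd : d.Perm (e :: d.erase e) := List.perm_cons_erase hed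
      have h2 : (c ++ d.erase e).Perm t' := by
        have h3 : (c ++ d).Perm (e :: (c ++ d.erase e)) := by
          have h4 := hd.append_left c
          exact h4.trans List.perm_middle
        exact (h3.symm.trans h).cons_inv
      obtain ⟨ab, hab, h4, h5⟩ := ih h2
      exact ⟨(ab.1, e :: ab.2), (pvSplits_mem_cons e hab).2,
        h4, (h5.cons e).trans hd.symm⟩

-- memo-free version of pvGo
def goP (items : List Int) : List Int :=
  match items with
  | [] => [0]
  | h :: t =>
    (pvSplits t).attach.foldl
      (fun out ab =>
        (goP ab.1.2).foldl
          (fun o v => PySem.Set.add o (PySem.Int.bxor (h + ab.1.1.foldl (· + ·) 0) v)) out)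
      PySem.Set.empty
termination_by items.length
decreasing_by
  have := pvSplits_len2 ab.2
  simp only [List.length_cons]
  omega

def MemoOK (m : PySem.Dict (List Int) (List Int)) : Prop :=
  ∀ k v, m.get? k = some v → v = goP k

theorem goP_nil : goP [] = [0] := by rw [goP.eq_def]

theorem goP_cons (h : Int) (t : List Int) :
    goP (h :: t) = (pvSplits t).attach.foldl
      (fun out ab =>
        (goP ab.1.2).foldl
          (fun o v => PySem.Set.add o
            (PySem.Int.bxor (h + ab.1.1.foldl (· + ·) 0) v)) out)
      PySem.Set.empty := by rw [goP.eq_def]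

theorem foldl_add_sum (l : List Int) : ∀ a, l.foldl (· + ·) a = a + l.sum := by
  induction l with
  | nil => simp
  | cons b t ih =>
    intro a
    simp only [List.foldl_cons, ih, List.sum_cons]
    ring

theorem pvGo_eq_aux : ∀ (n : Nat) (items : List Int), items.length < n →
    ∀ m, MemoOK m → (pvGo items m).1 = goP items ∧ MemoOK (pvGo items m).2 := by
  intro n
  induction n with
  | zero => intro items h; omega
  | succ n ih =>
    intro items hlen m hm
    cases hget : m.get? items with
    | some v =>
      rw [pvGo.eq_def, hget]
      exact ⟨(hm _ _ hget).symm ▸ rfl, hm⟩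
    | none =>
      cases items with
      | nil =>
        rw [pvGo.eq_def, hget]
        refine ⟨by rw [goP_nil], ?_⟩
        intro k v hk
        rw [PySem.Dict.get?_insert] at hk
        by_cases hkk : k = ([] : List Int)
        · rw [if_pos hkk] at hk
          cases hk
          rw [hkk, goP_nil]
        · rw [if_neg hkk] at hk
          exact hm k v hk
      | cons h t =>
        rw [pvGo.eq_def, hget]
        dsimp only
        have key : ∀ (L : List {ab : List Int × List Int // ab ∈ pvSplits t})
            (acc : List Int × PySem.Dict (List Int) (List Int)), MemoOK acc.2 →
            (L.foldl
              (fun acc ab =>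
                ((pvGo ab.1.2 acc.2).1.foldl
                  (fun out v => PySem.Set.add out
                    (PySem.Int.bxor (h + ab.1.1.foldl (· + ·) 0) v)) acc.1,
                 (pvGo ab.1.2 acc.2).2)) acc).1 =
              L.foldl
                (fun out ab =>
                  (goP ab.1.2).foldl
                    (fun o v => PySem.Set.add o
                      (PySem.Int.bxor (h + ab.1.1.foldl (· + ·) 0) v)) out) acc.1 ∧
            MemoOK (L.foldl
              (fun acc ab =>
                ((pvGo ab.1.2 acc.2).1.foldl
                  (fun out v => PySem.Set.add out
                    (PySem.Int.bxor (h + ab.1.1.foldl (· + ·) 0) v)) acc.1,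
                 (pvGo ab.1.2 acc.2).2)) acc).2 := by
          intro L
          induction L with
          | nil => exact fun acc hacc => ⟨rfl, hacc⟩
          | cons ab L' ihL =>
            intro acc hacc
            have hablen : ab.1.2.length < n := by
              have h1 := pvSplits_len2 ab.2
              simp only [List.length_cons] at hlen
              omega
            have hchild := ih ab.1.2 hablen acc.2 hacc
            have hstep :
                ((pvGo ab.1.2 acc.2).1.foldl
                  (fun out v => PySem.Set.add out
                    (PySem.Int.bxor (h + ab.1.1.foldl (· + ·) 0) v)) acc.1,
                 (pvGo ab.1.2 acc.2).2) =
                ((goP ab.1.2).foldl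
                  (fun out v => PySem.Set.add out
                    (PySem.Int.bxor (h + ab.1.1.foldl (· + ·) 0) v)) acc.1,
                 (pvGo ab.1.2 acc.2).2) := by
              rw [hchild.1]
            simp only [List.foldl_cons]
            rw [hstep]
            exact ihL _ hchild.2
        have hkey := key (pvSplits t).attach (PySem.Set.empty, m) hm
        refine ⟨?_, ?_⟩
        · rw [goP_cons]
          exact hkey.1
        · intro k v hk
          rw [PySem.Dict.get?_insert] at hk
          by_cases hkk : k = h :: t
          · rw [if_pos hkk] at hk
            cases hk
            rw [hkk, goP_cons]
            exact hkey.1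
          · rw [if_neg hkk] at hk
            exact hkey.2 k v hk

theorem pvGo_eq (items : List Int) (m : PySem.Dict (List Int) (List Int)) (hm : MemoOK m) :
    (pvGo items m).1 = goP items ∧ MemoOK (pvGo items m).2 :=
  pvGo_eq_aux (items.length + 1) items (by omega) m hm

theorem inner_fold_nodup (s0 : Int) (vs : List Int) (acc : PySem.Set Int)
    (h : acc.Nodup) :
    (vs.foldl (fun o v => PySem.Set.add o (PySem.Int.bxor s0 v)) acc).Nodup := by
  induction vs generalizing acc with
  | nil => exact h
  | cons v vs' ih => exact ih _ (PySem.Set.nodup_add _ _ h)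

theorem goP_nodup (items : List Int) : (goP items).Nodup := by
  cases items with
  | nil => rw [goP_nil]; simp
  | cons h t =>
    rw [goP_cons]
    have key : ∀ (L : List {ab : List Int × List Int // ab ∈ pvSplits t})
        (acc : PySem.Set Int), acc.Nodup →
        (L.foldl
          (fun out ab =>
            (goP ab.1.2).foldl
              (fun o v => PySem.Set.add o
                (PySem.Int.bxor (h + ab.1.1.foldl (· + ·) 0) v)) out) acc).Nodup := by
      intro L
      induction L with
      | nil => exact fun acc hacc => hacc
      | cons ab L' ihL => exact fun acc hacc => ihL _ (inner_fold_nodup _ _ _ hacc)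
    exact key _ _ (by simp [PySem.Set.empty])

theorem goP_mem_aux : ∀ (n : Nat) (items : List Int), items.length < n →
    ∀ x, (x ∈ goP items ↔ PXor items x) := by
  intro n
  induction n with
  | zero => intro items h; omega
  | succ n ih =>
    intro items hlen x
    cases items with
    | nil =>
      rw [goP_nil]
      simp only [List.mem_singleton]
      constructor
      · rintro rfl
        exact ⟨[], ⟨by simp, by simp⟩, rfl⟩
      · rintro ⟨bs, ⟨hne, hperm⟩, rfl⟩
        have hbs : bs = [] := by
          cases bs with
          | nil => rfl
          | cons b bs' =>
            have h0 : (b :: bs').flatten = [] := hperm.eq_nil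
            simp only [List.flatten_cons] at h0
            obtain ⟨hb, -⟩ := List.append_eq_nil_iff.1 h0
            exact absurd hb (hne b (by simp))
        subst hbs
        rfl
    | cons h t =>
      rw [goP_cons]
      have hmemfold : ∀ (L : List {ab : List Int × List Int // ab ∈ pvSplits t})
          (acc : PySem.Set Int),
          (x ∈ L.foldl
            (fun out ab =>
              (goP ab.1.2).foldl
                (fun o v => PySem.Set.add o
                  (PySem.Int.bxor (h + ab.1.1.foldl (· + ·) 0) v)) out) acc ↔
           x ∈ acc ∨ ∃ ab ∈ L, ∃ v ∈ goP ab.1.2,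
             x = PySem.Int.bxor (h + ab.1.1.foldl (· + ·) 0) v) := by
        intro L
        induction L with
        | nil => simp
        | cons ab L' ihL =>
          intro acc
          rw [List.foldl_cons, ihL, PySem.Set.mem_foldl_add]
          constructor
          · rintro ((hx | ⟨v, hv, rfl⟩) | ⟨ab', hab', v, hv, rfl⟩)
            · exact Or.inl hx
            · exact Or.inr ⟨ab, by simp, v, hv, rfl⟩
            · exact Or.inr ⟨ab', by simp [hab'], v, hv, rfl⟩
          · rintro (hx | ⟨ab', hab', v, hv, rfl⟩)
            · exact Or.inl (Or.inl hx)
            · rcases List.mem_cons.1 hab' with rfl | hab''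
              · exact Or.inl (Or.inr ⟨v, hv, rfl⟩)
              · exact Or.inr ⟨ab', hab'', v, hv, rfl⟩
      rw [hmemfold]
      have hlent : t.length < n := by
        simp only [List.length_cons] at hlen
        omega
      constructor
      · rintro (hx | ⟨ab, -, v, hv, rfl⟩)
        · simp [PySem.Set.empty] at hx
        · have hab := ab.2
          have hablen : ab.1.2.length < n := by
            have := pvSplits_len2 hab
            omega
          obtain ⟨bs2, hp2, rfl⟩ := (ih ab.1.2 hablen v).1 hv
          refine ⟨(h :: ab.1.1) :: bs2, ⟨?_, ?_⟩, ?_⟩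
          · intro b hb
            rcases List.mem_cons.1 hb with rfl | hb'
            · simp
            · exact hp2.1 b hb'
          · have h1 : ((h :: ab.1.1) :: bs2).flatten = h :: (ab.1.1 ++ bs2.flatten) := by
              simp
            rw [h1]
            have h2 : (ab.1.1 ++ bs2.flatten).Perm (ab.1.1 ++ ab.1.2) :=
              hp2.2.append_left ab.1.1
            exact ((h2.trans (pvSplits_perm hab)).cons h)
          · simp only [List.map_cons, xorF_cons, List.sum_cons]
            rw [foldl_add_sum, Int.zero_add]
          -- note: `rw` above normalises h + sum(ab.1.1)
      · rintro ⟨bs, ⟨hne, hperm⟩, rfl⟩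
        have hh : h ∈ bs.flatten := hperm.symm.subset (by simp)
        obtain ⟨b, hbmem, hhb⟩ := List.mem_flatten.1 hh
        have hbs2 : bs.Perm (b :: bs.erase b) := List.perm_cons_erase hbmem
        have hbsplit : b.Perm (h :: b.erase h) := List.perm_cons_erase hhb
        have hrest : (b.erase h ++ (bs.erase b).flatten).Perm t := by
          have h1 : bs.flatten.Perm ((b :: bs.erase b).flatten) := flatten_perm hbs2
          have h2 : ((b :: bs.erase b).flatten) = b ++ (bs.erase b).flatten := by simp
          have h3 : (b ++ (bs.erase b).flatten).Perm
              (h :: (b.erase h ++ (bs.erase b).flatten)) := by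
            have := hbsplit.append_right ((bs.erase b).flatten)
            simpa using this
          have h4 : (h :: (b.erase h ++ (bs.erase b).flatten)).Perm (h :: t) :=
            (h3.symm.trans ((h2 ▸ h1).symm.trans hperm))
          exact h4.cons_inv
        obtain ⟨ab, hab, hab1, hab2⟩ := pvSplits_surj hrest
        have hablen : ab.2.length < n := by
          have := pvSplits_len2 hab
          omega
        have hp2 : IsPart ab.2 (bs.erase b) := by
          refine ⟨fun b' hb' => hne b' (hbs2.symm.subset (by simp [hb'])), hab2.symm⟩
        have hv : xorF ((bs.erase b).map List.sum) ∈ goP ab.2 :=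
          (ih ab.2 hablen _).2 ⟨bs.erase b, hp2, rfl⟩
        refine Or.inr ⟨⟨ab, hab⟩, List.mem_attach _ _, _, hv, ?_⟩
        have hsumb : b.sum = h + ab.1.sum := by
          rw [hbsplit.sum_eq]
          simp only [List.sum_cons]
          rw [hab1.sum_eq]
        have hx1 : xorF (bs.map List.sum) = xorF ((b :: bs.erase b).map List.sum) :=
          xorF_perm (hbs2.map List.sum)
        rw [hx1]
        simp only [List.map_cons, xorF_cons]
        rw [hsumb, foldl_add_sum, Int.zero_add]

theorem goP_mem (items : List Int) (x : Int) : x ∈ goP items ↔ PXor items x :=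
  goP_mem_aux (items.length + 1) items (by omega) x

-- ===== VERDICT (by name: the statement is the Claim_ definition above) =====
theorem get_unique_xor_values_spec : Claim_equal_get_unique_xor_values := by
  intro n dp _
  show _ = _
  unfold get_unique_xor_values get_unique_xor_values_alt
  have hB := pvGo_eq dp PySem.Dict.empty (fun k v h => by simp [PySem.Dict.get?_empty] at h)
  rw [hB.1]
  obtain ⟨hnd, hmem⟩ := dfs_final dp
  have : ((pvDfs (dp.length + 1) dp (PySem.Set.empty, PySem.Set.empty)).2).Perm (goP dp) := by
    rw [List.perm_ext_iff_of_nodup hnd (goP_nodup dp)]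
    intro x
    rw [hmem x, goP_mem dp x]
  rw [this.length_eq]
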